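-- pv_equiv track=rewrite | github.com/wgdcwd/hongchanyoung-algorithm | Python/백준/Silver/2641. 다각형그리기/다각형그리기.py | is_same
-- ===== SOURCE A (Python) =====
-- def is_same(a, b):
--     for i in range(len(b)):
--         for j in range(len(a)):
--             if a[j] != b[(i + j) % len(b)]:
--                 break
--             if j == len(a) - 1:
--                 return True
--     return False
-- ===== SOURCE B (Python) =====
-- def is_same(a, b):
--     if not a or not b:
--         return False
--     reps = (len(a) + len(b) - 1) // len(b) + 1
--     t = b * reps
--     return any(t[i] == a[0] and t[i:i + len(a)] == a for i in range(len(b)))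
-- ===== Notes on version B (the rewrite author's own statement) =====
-- stated objective: faster
-- what changed: Instead of A's nested interpreted index loops with modular arithmetic, B materialises b repeated enough times once and tests C-level whole-slice equality t[i:i+len(a)] == a behind a cheap first-element filter for each start i < len(b).
import Mathlib
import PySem

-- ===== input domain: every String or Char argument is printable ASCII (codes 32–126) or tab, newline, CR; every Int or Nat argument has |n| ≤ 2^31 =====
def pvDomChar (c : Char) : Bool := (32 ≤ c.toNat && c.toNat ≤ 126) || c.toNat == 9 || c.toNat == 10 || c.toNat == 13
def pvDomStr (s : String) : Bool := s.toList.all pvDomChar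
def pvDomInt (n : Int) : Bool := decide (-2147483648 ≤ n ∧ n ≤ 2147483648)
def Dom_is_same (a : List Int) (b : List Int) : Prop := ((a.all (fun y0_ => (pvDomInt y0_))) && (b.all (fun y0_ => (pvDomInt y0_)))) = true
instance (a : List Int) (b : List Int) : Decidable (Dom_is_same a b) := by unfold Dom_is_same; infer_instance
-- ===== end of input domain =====

-- B checks whether a occurs in the cyclic sequence b by slice comparison over b repeated enough
-- times, replacing A's nested index loops with modular arithmetic (objective: constant-factor speed).

-- ===== PORT A =====
-- inner 'for j in range(len(a))' with break / early 'return True'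
def isSameInnerA (a b : List Int) (i : Int) : List Int → Bool
  | [] => false
  | j :: rest =>
    if PySem.List.pyGet? a j ≠ PySem.List.pyGet? b (PySem.Int.mod (i + j) (b.length : Int)) then
      false
    else if j = (a.length : Int) - 1 then true
    else isSameInnerA a b i rest

-- outer 'for i in range(len(b))' with early 'return True'
def isSameOuterA (a b : List Int) : List Int → Bool
  | [] => false
  | i :: rest =>
    if isSameInnerA a b i (PySem.List.pyRange 0 (a.length : Int) 1) then true
    else isSameOuterA a b rest

def is_same (a : List Int) (b : List Int) : Bool :=
  isSameOuterA a b (PySem.List.pyRange 0 (b.length : Int) 1)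

-- ===== PORT B =====
def is_same_alt (a : List Int) (b : List Int) : Bool :=
  if a = [] ∨ b = [] then false
  else
    let reps : Int := PySem.Int.floordiv ((a.length : Int) + (b.length : Int) - 1) (b.length : Int) + 1
    let t : List Int := (List.replicate reps.toNat b).flatten
    (PySem.List.pyRange 0 (b.length : Int) 1).any
      (fun i => (PySem.List.pyGet? t i == PySem.List.pyGet? a 0)
        && (PySem.List.slice t (some i) (some (i + (a.length : Int))) == a))

-- ===== PRECONDITION & SPEC =====
def Spec_is_same (a : List Int) (b : List Int) (out : Bool) : Prop := out = is_same_alt a b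
instance (a : List Int) (b : List Int) (out : Bool) : Decidable (Spec_is_same a b out) := by unfold Spec_is_same; infer_instance

-- ===== CLAIM (what is proved, stated in full; the proofs are below) =====
def Claim_equal_is_same : Prop := ∀ (a : List Int) (b : List Int), Dom_is_same a b → Spec_is_same a b (is_same a b)

-- ===== LEMMAS AND PROOFS =====

-- t = b repeated r times, indexed cyclically
theorem getElem?_flatten_replicate (b : List Int) (r k : Nat) (hk : k < r * b.length) :
    ((List.replicate r b).flatten)[k]? = b[k % b.length]? := by
  induction r generalizing k with
  | zero => omega
  | succ r ih =>
    have hmul : (r + 1) * b.length = r * b.length + b.length := by ring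
    have hb : 0 < b.length := by by_contra h; simp at h; simp [h] at hk
    have hsplit : (List.replicate (r+1) b).flatten = b ++ (List.replicate r b).flatten := by
      simp [List.replicate_succ]
    rw [hsplit]
    by_cases h : k < b.length
    · rw [List.getElem?_append_left h, Nat.mod_eq_of_lt h]
    · push_neg at h
      rw [List.getElem?_append_right h]
      rw [ih (k - b.length) (by omega)]
      congr 1
      have hk' : k = (k - b.length) + b.length := by omega
      conv_rhs => rw [hk']
      rw [Nat.add_mod_right]

theorem length_flatten_replicate (b : List Int) (r : Nat) :
    ((List.replicate r b).flatten).length = r * b.length := by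
  induction r with
  | zero => simp
  | succ r ih => simp [List.replicate_succ, ih]; ring

-- A's inner loop over the tail [j0, …, n-1] of range(len(a)), nonnegative start i
theorem innerA_go (a b : List Int) (iN : Nat) (hb : 0 < b.length) :
    ∀ (k j0 : Nat), j0 + k = a.length →
    isSameInnerA a b (iN : Int) ((List.range' j0 k).map (fun j : Nat => (j : Int)))
      = decide (1 ≤ k ∧ ∀ j : Nat, j0 ≤ j → j < a.length →
          a[j]? = b[(iN + j) % b.length]?) := by
  intro k
  induction k with
  | zero =>
    intro j0 h
    simp only [List.range'_zero, List.map_nil]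
    have h1 : isSameInnerA a b (iN : Int) ([] : List Int) = false := rfl
    rw [h1]
    symm
    rw [decide_eq_false_iff_not]
    rintro ⟨h1, -⟩
    omega
  | succ k ih =>
    intro j0 h
    rw [List.range'_succ]
    simp only [List.map_cons, isSameInnerA]
    have hmod : PySem.Int.mod ((iN : Int) + (j0 : Int)) (b.length : Int)
        = (((iN + j0) % b.length : Nat) : Int) := by
      have : ((iN : Int) + (j0 : Int)) = ((iN + j0 : Nat) : Int) := by push_cast; ring
      rw [this, PySem.Int.mod_natCast]
    rw [hmod, PySem.List.pyGet?_natCast, PySem.List.pyGet?_natCast]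
    by_cases hne : a[j0]? ≠ b[(iN + j0) % b.length]?
    · simp only [if_pos hne]
      have : ¬ (1 ≤ k + 1 ∧ ∀ j : Nat, j0 ≤ j → j < a.length →
          a[j]? = b[(iN + j) % b.length]?) := by
        rintro ⟨-, hall⟩
        exact hne (hall j0 le_rfl (by omega))
      exact (decide_eq_false this).symm
    · push_neg at hne
      simp only [hne, ne_eq, not_true_eq_false, if_false]
      by_cases hlast : (j0 : Int) = (a.length : Int) - 1
      · have hj0 : j0 = a.length - 1 := by omega
        have hk0 : k = 0 := by omega
        rw [if_pos hlast]
        have : (1 ≤ k + 1 ∧ ∀ j : Nat, j0 ≤ j → j < a.length →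
            a[j]? = b[(iN + j) % b.length]?) := by
          refine ⟨by omega, fun j hj1 hj2 => ?_⟩
          have : j = j0 := by omega
          subst this; exact hne
        exact (decide_eq_true this).symm
      · rw [if_neg hlast]
        have hj0lt : j0 + 1 + k = a.length := by omega
        rw [ih (j0 + 1) hj0lt]
        have hk1 : 1 ≤ k := by
          rcases Nat.eq_zero_or_pos k with h0 | h1
          · exfalso; apply hlast; omega
          · exact h1
        have : ((1 ≤ k ∧ ∀ j : Nat, j0 + 1 ≤ j → j < a.length → a[j]? = b[(iN + j) % b.length]?)
            ↔ (1 ≤ k + 1 ∧ ∀ j : Nat, j0 ≤ j → j < a.length → a[j]? = b[(iN + j) % b.length]?)) := by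
          constructor
          · rintro ⟨-, hall⟩
            refine ⟨by omega, fun j hj1 hj2 => ?_⟩
            rcases Nat.eq_or_lt_of_le hj1 with rfl | hlt
            · exact hne
            · exact hall j hlt hj2
          · rintro ⟨-, hall⟩
            exact ⟨hk1, fun j hj1 hj2 => hall j (by omega) hj2⟩
        simp only [decide_eq_decide]
        exact this

-- A's outer loop is an 'any'
theorem outerA_any (a b : List Int) (l : List Int) :
    isSameOuterA a b l = l.any (fun i => isSameInnerA a b i (PySem.List.pyRange 0 (a.length : Int) 1)) := by
  induction l with
  | nil => simp [isSameOuterA]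
  | cons x xs ih =>
    simp only [isSameOuterA, List.any_cons, ih]
    by_cases h : isSameInnerA a b x (PySem.List.pyRange 0 (a.length : Int) 1) = true
    · simp [h]
    · simp [h]

theorem list_eq_iff_getElem? (xs ys : List Int) (h : xs.length = ys.length) :
    (xs = ys) ↔ (∀ j : Nat, j < ys.length → xs[j]? = ys[j]?) := by
  constructor
  · rintro rfl; intro j _; rfl
  · intro hall
    apply List.ext_getElem?
    intro j
    by_cases hj : j < ys.length
    · exact hall j hj
    · rw [List.getElem?_eq_none (by omega), List.getElem?_eq_none (by omega)]

theorem any_congr_mem (l : List Int) (f g : Int → Bool) (h : ∀ x ∈ l, f x = g x) :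
    l.any f = l.any g := by
  induction l with
  | nil => rfl
  | cons x xs ih =>
    simp only [List.any_cons, h x (by simp)]
    rw [ih (fun y hy => h y (by simp [hy]))]

-- ===== VERDICT (by name: the statement is the Claim_ definition above) =====
theorem is_same_spec : Claim_equal_is_same := by
  unfold Claim_equal_is_same
  intro a b _
  unfold Spec_is_same
  by_cases hb : b = []
  · subst hb
    simp [is_same, is_same_alt, isSameOuterA, PySem.List.pyRange_one]
  · by_cases ha : a = []
    · subst ha
      have h0 : PySem.List.pyRange 0 ((([] : List Int).length : Int)) 1 = [] := by decide
      rw [is_same, outerA_any]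
      simp [h0, isSameInnerA, is_same_alt]
    · have hbl : 0 < b.length := List.length_pos_of_ne_nil hb
      have hal : 0 < a.length := List.length_pos_of_ne_nil ha
      have hreps : (PySem.Int.floordiv ((a.length : Int) + (b.length : Int) - 1) (b.length : Int) + 1)
          = (((a.length + b.length - 1) / b.length + 1 : Nat) : Int) := by
        have h1 : ((a.length : Int) + (b.length : Int) - 1) = ((a.length + b.length - 1 : Nat) : Int) := by
          push_cast; omega
        rw [h1, PySem.Int.floordiv_natCast]; push_cast; ring
      set r : Nat := (a.length + b.length - 1) / b.length + 1 with hr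
      have hrm : a.length + b.length ≤ r * b.length := by
        have hdm := Nat.div_add_mod (a.length + b.length - 1) b.length
        have hlt := Nat.mod_lt (a.length + b.length - 1) hbl
        have h2 : b.length * ((a.length + b.length - 1) / b.length) ≥ a.length := by omega
        calc a.length + b.length ≤ b.length * ((a.length + b.length - 1) / b.length) + b.length := by omega
          _ = r * b.length := by rw [hr]; ring
      set t : List Int := (List.replicate r b).flatten with ht
      have htlen : t.length = r * b.length := length_flatten_replicate b r
      have halt : is_same_alt a b = (PySem.List.pyRange 0 (b.length : Int) 1).any
          (fun i => (PySem.List.pyGet? t i == PySem.List.pyGet? a 0)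
            && (PySem.List.slice t (some i) (some (i + (a.length : Int))) == a)) := by
        unfold is_same_alt
        rw [if_neg (by simp [ha, hb])]
        simp only [hreps, Int.toNat_natCast, ← hr, ← ht]
      rw [halt]
      unfold is_same
      rw [outerA_any]
      apply any_congr_mem
      intro i hi
      rw [PySem.List.mem_pyRange_one] at hi
      obtain ⟨hi0, him⟩ := hi
      obtain ⟨iN, rfl⟩ := Int.eq_ofNat_of_zero_le hi0
      have hiN : iN < b.length := by exact_mod_cast him
      have hrange : PySem.List.pyRange 0 (a.length : Int) 1
          = (List.range' 0 a.length).map (fun j : Nat => (j : Int)) := by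
        rw [PySem.List.pyRange_one]
        have h0 : (((a.length : Int)) - 0).toNat = a.length := by omega
        rw [h0, List.range_eq_range']
        exact List.map_congr_left (fun x _ => by simp)
      rw [hrange, innerA_go a b iN hbl a.length 0 (by omega)]
      have hslice : PySem.List.slice t (some (iN : Int)) (some ((iN : Int) + (a.length : Int)))
          = (t.drop iN).take a.length := PySem.List.slice_natCast_add t iN a.length
      rw [hslice]
      have hpt : ∀ j : Nat, j < a.length → ((t.drop iN).take a.length)[j]? = b[(iN + j) % b.length]? := by
        intro j hj
        rw [List.getElem?_take, if_pos hj, List.getElem?_drop]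
        rw [ht, getElem?_flatten_replicate b r (iN + j) (by omega)]
      have hlen2 : ((t.drop iN).take a.length).length = a.length := by
        rw [List.length_take, List.length_drop, htlen]
        omega
      have heq : ((t.drop iN).take a.length = a) ↔
          (1 ≤ a.length ∧ ∀ j : Nat, 0 ≤ j → j < a.length → a[j]? = b[(iN + j) % b.length]?) := by
        rw [list_eq_iff_getElem? _ _ (by rw [hlen2])]
        constructor
        · intro hall
          refine ⟨by omega, fun j _ hj => ?_⟩
          rw [← hall j hj, hpt j hj]
        · rintro ⟨-, hall⟩
          intro j hj
          rw [hpt j hj, hall j (by omega) hj]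
      have htb : t[iN]? = b[iN % b.length]? := by
        rw [ht, getElem?_flatten_replicate b r iN (by omega)]
      have hga : ((t.drop iN).take a.length = a) → t[iN]? = a[0]? := by
        intro hEq
        have h0 := hpt 0 hal
        rw [hEq] at h0
        simp only [Nat.add_zero] at h0
        rw [htb]
        exact h0.symm
      rw [Bool.eq_iff_iff]
      simp only [decide_eq_true_eq, Bool.and_eq_true, beq_iff_eq]
      constructor
      · intro hP
        have hEq : (t.drop iN).take a.length = a := heq.mpr hP
        refine ⟨?_, hEq⟩
        rw [PySem.List.pyGet?_natCast, PySem.List.pyGet?_zero]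
        exact hga hEq
      · rintro ⟨-, hEq⟩
        exact heq.mp hEq
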